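-- pv_equiv track=rewrite | github.com/tenxyte/tenxyte | src/tenxyte/device_info.py | devices_match
-- ===== SOURCE A (Python) =====
-- def parse_device_info(device_info: str) -> dict:
--     """
--     Parse une string device_info au format v1 en dictionnaire.
--
--     Args:
--         device_info: String au format 'v=1|os=windows;osv=11|device=desktop|...'
--
--     Returns:
--         Dictionnaire avec toutes les clés extraites.
--
--     Examples:
--         >>> parse_device_info('v=1|os=windows;osv=11|device=desktop|arch=x64')
--         {'v': '1', 'os': 'windows', 'osv': '11', 'device': 'desktop', 'arch': 'x64'}
--
--         >>> parse_device_info('')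
--         {}
--     """
--     if not device_info or not device_info.strip():
--         return {}
--
--     result = {}
--     categories = device_info.split('|')
--
--     for category in categories:
--         pairs = category.split(';')
--         for pair in pairs:
--             if '=' not in pair:
--                 continue
--             key, _, value = pair.partition('=')
--             key = key.strip()
--             value = value.strip()
--             if key and value:
--                 result[key] = value
--
--     return result
--
-- def devices_match(device_info_a: str, device_info_b: str) -> bool:
--     """
--     Compare deux device_info pour déterminer s'ils représentent le même appareil.
--     Compare sur les clés stables : os, device, arch, app, runtime.
--     Ignore les versions et la timezone.
--
--     Args:
--         device_info_a: Première string device_info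
--         device_info_b: Deuxième string device_info
--
--     Returns:
--         True si les deux device_info représentent le même appareil
--
--     Examples:
--         >>> devices_match(
--         ...     'v=1|os=windows;osv=11|device=desktop|runtime=chrome;rtv=122',
--         ...     'v=1|os=windows;osv=11|device=desktop|runtime=chrome;rtv=123'
--         ... )
--         True
--     """
--     if not device_info_a and not device_info_b:
--         return True
--     if not device_info_a or not device_info_b:
--         return False
--
--     a = parse_device_info(device_info_a)
--     b = parse_device_info(device_info_b)
--
--     # Clés d'identité du device (sans versions)
--     identity_keys = ['os', 'device', 'arch', 'app', 'runtime']
--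
--     return all(a.get(k) == b.get(k) for k in identity_keys)
-- ===== SOURCE B (Python) =====
-- # B: instead of parsing each string into a full dict, scan the pair list
-- # back-to-front once per identity key and take the first valid occurrence
-- # (= last non-empty-valued occurrence, i.e. dict overwrite semantics).
-- IDENTITY_KEYS = ('os', 'device', 'arch', 'app', 'runtime')
--
--
-- def _pairs(s):
--     return [pair for category in s.split('|') for pair in category.split(';')]
--
--
-- def _ident_value(rev_pairs, key):
--     for pair in rev_pairs:
--         head, sep, tail = pair.partition('=')
--         if sep and head.strip() == key:
--             value = tail.strip()
--             if value:
--                 return value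
--     return None
--
--
-- def _identity(s):
--     rev = list(reversed(_pairs(s)))
--     return tuple(_ident_value(rev, k) for k in IDENTITY_KEYS)
--
--
-- def devices_match(device_info_a: str, device_info_b: str) -> bool:
--     if not device_info_a and not device_info_b:
--         return True
--     if not device_info_a or not device_info_b:
--         return False
--     return _identity(device_info_a) == _identity(device_info_b)
-- ===== Notes on version B (the rewrite author's own statement) =====
-- stated objective: simpler
-- what changed: B drops the full-dict parse: it flattens each string into its key=value pair list once and, for each of the five identity keys, scans that list back-to-front taking the first valid occurrence (equivalent to dict overwrite last-wins), then compares the five-value tuples.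
import Mathlib
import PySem

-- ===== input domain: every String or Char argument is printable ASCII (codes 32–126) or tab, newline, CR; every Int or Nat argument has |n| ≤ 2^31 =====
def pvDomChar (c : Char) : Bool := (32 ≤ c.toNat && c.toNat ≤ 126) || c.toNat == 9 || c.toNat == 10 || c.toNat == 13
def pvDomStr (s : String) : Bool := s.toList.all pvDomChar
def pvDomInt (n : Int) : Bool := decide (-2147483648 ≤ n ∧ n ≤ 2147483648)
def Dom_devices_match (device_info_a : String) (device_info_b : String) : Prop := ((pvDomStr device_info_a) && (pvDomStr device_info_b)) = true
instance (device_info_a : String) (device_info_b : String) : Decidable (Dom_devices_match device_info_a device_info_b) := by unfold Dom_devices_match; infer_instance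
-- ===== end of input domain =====

-- B replaces A's full-dict parse by one back-to-front scan of the key=value pairs per
-- identity key (first valid occurrence from the right = dict overwrite semantics): simpler decomposition.


-- ===== PORT A =====
-- Strings are handled as their char lists (PySem.Chars are the list-level definitions of Python's str ops).
-- pair.partition('=') for the single-char separator '=' is exactly
-- (takeWhile pvNotEq pair, the rest starting at the first '='): key = part before, value = rest.tail.
def pvNotEq (c : Char) : Bool := c ≠ '='

-- body of A's inner loop: 'if '=' not in pair: continue; key,_,value = pair.partition('='); strip; if key and value: result[key] = value'
def pvStepA (result : PySem.Dict (List Char) (List Char)) (pair : List Char) :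
    PySem.Dict (List Char) (List Char) :=
  if PySem.Chars.isIn ['='] pair = false then result
  else
    let key := PySem.Chars.strip (pair.takeWhile pvNotEq)
    let value := PySem.Chars.strip ((pair.dropWhile pvNotEq).tail)
    if key ≠ [] ∧ value ≠ [] then result.insert key value else result

def parse_device_info (device_info : List Char) : PySem.Dict (List Char) (List Char) :=
  if device_info = [] ∨ PySem.Chars.strip device_info = [] then PySem.Dict.empty
  else
    (PySem.Chars.splitOn device_info ['|']).foldl
      (fun result category => (PySem.Chars.splitOn category [';']).foldl pvStepA result)
      PySem.Dict.empty

def pvIdentityKeys : List (List Char) :=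
  ["os".toList, "device".toList, "arch".toList, "app".toList, "runtime".toList]

def devices_match (device_info_a : String) (device_info_b : String) : Bool :=
  if device_info_a.toList = [] ∧ device_info_b.toList = [] then true
  else if device_info_a.toList = [] ∨ device_info_b.toList = [] then false
  else
    let a := parse_device_info device_info_a.toList
    let b := parse_device_info device_info_b.toList
    pvIdentityKeys.all (fun k => a.get? k == b.get? k)

-- ===== PORT B =====
-- 'head, sep, tail = pair.partition('='); if sep and head.strip() == key: value = tail.strip(); if value: return value'
def pvPick (key : List Char) (pair : List Char) : Option (List Char) :=
  let rest := pair.dropWhile pvNotEq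
  if rest = [] then none
  else if PySem.Chars.strip (pair.takeWhile pvNotEq) = key then
    let value := PySem.Chars.strip rest.tail
    if value = [] then none else some value
  else none

-- B's _ident_value: first valid occurrence in the (already reversed) pair list
def pvIdentValue : List (List Char) → List Char → Option (List Char)
  | [], _ => none
  | pair :: rest, key =>
      match pvPick key pair with
      | some v => some v
      | none => pvIdentValue rest key

def pvPairs (s : List Char) : List (List Char) :=
  (PySem.Chars.splitOn s ['|']).flatMap (fun category => PySem.Chars.splitOn category [';'])

def pvIdentity (s : List Char) :
    Option (List Char) × Option (List Char) × Option (List Char) × Option (List Char) × Option (List Char) :=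
  let rev := (pvPairs s).reverse
  (pvIdentValue rev "os".toList, pvIdentValue rev "device".toList, pvIdentValue rev "arch".toList,
   pvIdentValue rev "app".toList, pvIdentValue rev "runtime".toList)

def devices_match_alt (device_info_a : String) (device_info_b : String) : Bool :=
  if device_info_a.toList = [] ∧ device_info_b.toList = [] then true
  else if device_info_a.toList = [] ∨ device_info_b.toList = [] then false
  else pvIdentity device_info_a.toList == pvIdentity device_info_b.toList

-- ===== PRECONDITION & SPEC =====
def Spec_devices_match (device_info_a : String) (device_info_b : String) (out : Bool) : Prop := out = devices_match_alt device_info_a device_info_b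
instance (device_info_a : String) (device_info_b : String) (out : Bool) : Decidable (Spec_devices_match device_info_a device_info_b out) := by unfold Spec_devices_match; infer_instance

-- ===== CLAIM (what is proved, stated in full; the proofs are below) =====
def Claim_equal_devices_match : Prop := ∀ (device_info_a : String) (device_info_b : String), Dom_devices_match device_info_a device_info_b → Spec_devices_match device_info_a device_info_b (devices_match device_info_a device_info_b)

-- ===== LEMMAS AND PROOFS =====

theorem pvSingletonInfix (c : Char) (l : List Char) : [c] <:+: l ↔ c ∈ l := by
  constructor
  · rintro ⟨s, t, rfl⟩; simp
  · intro h
    obtain ⟨s, t, rfl⟩ := List.append_of_mem h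
    exact ⟨s, t, by simp⟩

-- ''=' not in pair' said on the partition: the part from the first '=' on is empty
theorem pvNoEqIff (p : List Char) :
    PySem.Chars.isIn ['='] p = false ↔ p.dropWhile pvNotEq = [] := by
  rw [PySem.Chars.isIn_eq_false_iff, pvSingletonInfix, List.dropWhile_eq_nil_iff]
  constructor
  · intro h a ha
    unfold pvNotEq
    simp only [decide_eq_true_eq]
    rintro rfl
    exact h ha
  · intro h hmem
    have := h '=' hmem
    simp [pvNotEq] at this

-- one pair: A's dict step looked up at key k is B's per-pair pick, falling back to the old dict
theorem pvStepA_get (d : PySem.Dict (List Char) (List Char)) (p k : List Char) (hk : k ≠ []) :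
    (pvStepA d p).get? k = (pvPick k p).or (d.get? k) := by
  unfold pvStepA pvPick
  by_cases hd : p.dropWhile pvNotEq = []
  · rw [if_pos ((pvNoEqIff p).2 hd), if_pos hd]
    simp
  · have hin : ¬ (PySem.Chars.isIn ['='] p = false) := fun h => hd ((pvNoEqIff p).1 h)
    rw [if_neg hin, if_neg hd]
    by_cases hkey : PySem.Chars.strip (p.takeWhile pvNotEq) = k
    · rw [if_pos hkey]
      by_cases hv : PySem.Chars.strip ((p.dropWhile pvNotEq).tail) = []
      · rw [if_pos hv, if_neg (by simp [hv])]
        simp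
      · rw [if_neg hv, if_pos ⟨by rw [hkey]; exact hk, hv⟩, hkey]
        simp [PySem.Dict.get?_insert_self]
    · rw [if_neg hkey]
      by_cases hc : PySem.Chars.strip (p.takeWhile pvNotEq) ≠ [] ∧
          PySem.Chars.strip ((p.dropWhile pvNotEq).tail) ≠ []
      · rw [if_pos hc]
        exact PySem.Dict.get?_insert_of_ne d _ (Ne.symm hkey)
      · rw [if_neg hc]
        simp
theorem pvIdentValue_append (l₁ l₂ : List (List Char)) (k : List Char) :
    pvIdentValue (l₁ ++ l₂) k = (pvIdentValue l₁ k).or (pvIdentValue l₂ k) := by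
  induction l₁ with
  | nil => simp [pvIdentValue]
  | cons p rest ih =>
      simp only [List.cons_append, pvIdentValue]
      cases pvPick k p <;> simp [ih]

-- the loop invariant: A's left-to-right overwrite fold, looked up at k, is B's right-to-left first match
theorem pvFoldl_get (ps : List (List Char)) (d : PySem.Dict (List Char) (List Char))
    (k : List Char) (hk : k ≠ []) :
    (ps.foldl pvStepA d).get? k = (pvIdentValue ps.reverse k).or (d.get? k) := by
  induction ps generalizing d with
  | nil => simp [pvIdentValue]
  | cons p rest ih =>
      simp only [List.foldl_cons, List.reverse_cons]
      rw [ih, pvIdentValue_append, pvStepA_get d p k hk, Option.or_assoc]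
      congr 1
      unfold pvIdentValue
      cases pvPick k p <;> simp [pvIdentValue]

-- every char of a piece produced by splitOn comes from the split string
theorem pvSplitOnGo_mem (sep : List Char) (fuel : Nat) :
    ∀ (l cur : List Char) (acc : List (List Char)) (p : List Char) (c : Char),
      p ∈ PySem.Chars.splitOn.go sep fuel l cur acc → c ∈ p →
      c ∈ l ∨ c ∈ cur ∨ ∃ q ∈ acc, c ∈ q := by
  induction fuel with
  | zero =>
      intro l cur acc p c hp hc
      unfold PySem.Chars.splitOn.go at hp
      simp only [List.mem_reverse, List.mem_cons] at hp
      rcases hp with rfl | hp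
      · rcases List.mem_append.1 hc with h | h
        · exact Or.inr (Or.inl (List.mem_reverse.1 h))
        · exact Or.inl h
      · exact Or.inr (Or.inr ⟨p, hp, hc⟩)
  | succ fuel ih =>
      intro l cur acc p c hp hc
      cases l with
      | nil =>
          unfold PySem.Chars.splitOn.go at hp
          simp only [List.mem_reverse, List.mem_cons] at hp
          rcases hp with rfl | hp
          · exact Or.inr (Or.inl (List.mem_reverse.1 hc))
          · exact Or.inr (Or.inr ⟨p, hp, hc⟩)
      | cons x rest =>
          unfold PySem.Chars.splitOn.go at hp
          by_cases hpre : sep.isPrefixOf (x :: rest) = true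
          · simp only [hpre, if_true] at hp
            rcases ih _ _ _ _ _ hp hc with h | h | ⟨q, hq, hcq⟩
            · exact Or.inl (List.mem_of_mem_drop h)
            · simp at h
            · rcases List.mem_cons.1 hq with rfl | hq'
              · exact Or.inr (Or.inl (List.mem_reverse.1 hcq))
              · exact Or.inr (Or.inr ⟨q, hq', hcq⟩)
          · simp only [hpre] at hp
            rcases ih _ _ _ _ _ hp hc with h | h | h
            · exact Or.inl (List.mem_cons_of_mem _ h)
            · rcases List.mem_cons.1 h with rfl | h'
              · exact Or.inl List.mem_cons_self
              · exact Or.inr (Or.inl h')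
            · exact Or.inr (Or.inr h)

theorem pvSplitOn_mem (s sep p : List Char) (c : Char)
    (hp : p ∈ PySem.Chars.splitOn s sep) (hc : c ∈ p) : c ∈ s := by
  unfold PySem.Chars.splitOn at hp
  rcases pvSplitOnGo_mem sep (s.length + 1) s [] [] p c hp hc with h | h | ⟨q, hq, _⟩
  · exact h
  · simp at h
  · simp at hq

-- a string whose strip is empty is all whitespace
theorem pvStrip_empty_all_space (s : List Char) (h : PySem.Chars.strip s = []) :
    ∀ c ∈ s, PySem.Chars.isspace c = true := by
  unfold PySem.Chars.strip PySem.Chars.rstrip PySem.Chars.lstrip at h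
  have h1 : (List.dropWhile PySem.Chars.isspace
      (List.dropWhile PySem.Chars.isspace s).reverse) = [] := by
    have := congrArg List.reverse h
    simpa using this
  rw [List.dropWhile_eq_nil_iff] at h1
  intro c hc
  have hc' : c ∈ List.takeWhile PySem.Chars.isspace s ++ List.dropWhile PySem.Chars.isspace s := by
    rw [List.takeWhile_append_dropWhile]; exact hc
  rcases List.mem_append.1 hc' with h2 | h2
  · exact List.mem_takeWhile_imp h2
  · exact h1 c (List.mem_reverse.2 h2)

theorem pvIdentValue_none (l : List (List Char)) (k : List Char)
    (h : ∀ p ∈ l, pvPick k p = none) : pvIdentValue l k = none := by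
  induction l with
  | nil => rfl
  | cons p rest ih =>
      unfold pvIdentValue
      rw [h p List.mem_cons_self]
      exact ih (fun q hq => h q (List.mem_cons_of_mem _ hq))

-- the key per-string fact: A's parse looked up at a non-empty key = B's reverse scan
theorem pvParse_get (s k : List Char) (hs : s ≠ []) (hk : k ≠ []) :
    (parse_device_info s).get? k = pvIdentValue (pvPairs s).reverse k := by
  unfold parse_device_info
  by_cases hst : PySem.Chars.strip s = []
  · rw [if_pos (Or.inr hst), PySem.Dict.get?_empty]
    symm
    apply pvIdentValue_none
    intro p hp
    rw [List.mem_reverse] at hp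
    unfold pvPairs at hp
    rcases List.mem_flatMap.1 hp with ⟨cat, hcat, hpcat⟩
    have hnoeq : p.dropWhile pvNotEq = [] := by
      rw [List.dropWhile_eq_nil_iff]
      intro a ha
      have h1 : a ∈ cat := pvSplitOn_mem _ _ _ _ hpcat ha
      have h2 : a ∈ s := pvSplitOn_mem _ _ _ _ hcat h1
      have hsp := pvStrip_empty_all_space s hst a h2
      unfold pvNotEq
      simp only [decide_eq_true_eq]
      rintro rfl
      simp [PySem.Chars.isspace] at hsp
    unfold pvPick
    rw [if_pos hnoeq]
  · rw [if_neg (by simp [hs, hst])]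
    rw [show (PySem.Chars.splitOn s ['|']).foldl
          (fun result category => (PySem.Chars.splitOn category [';']).foldl pvStepA result)
          PySem.Dict.empty
        = (pvPairs s).foldl pvStepA PySem.Dict.empty from (List.foldl_flatMap).symm]
    rw [pvFoldl_get _ _ _ hk]
    simp [PySem.Dict.get?_empty]

-- ===== VERDICT (by name: the statement is the Claim_ definition above) =====
theorem devices_match_spec : Claim_equal_devices_match := by
  intro a b _
  unfold Spec_devices_match devices_match devices_match_alt
  by_cases ha : a.toList = [] <;> by_cases hb : b.toList = []
  · simp [ha, hb]
  · simp [ha, hb]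
  · simp [ha, hb]
  · rw [if_neg (by tauto), if_neg (by tauto), if_neg (by tauto), if_neg (by tauto)]
    have g := fun k hk => pvParse_get a.toList k ha hk
    have g' := fun k hk => pvParse_get b.toList k hb hk
    simp only [pvIdentityKeys, List.all_cons, List.all_nil, Bool.and_true]
    rw [g _ (by decide), g _ (by decide), g _ (by decide), g _ (by decide), g _ (by decide),
        g' _ (by decide), g' _ (by decide), g' _ (by decide), g' _ (by decide), g' _ (by decide)]
    unfold pvIdentity
    rw [Bool.eq_iff_iff]
    simp only [Bool.and_eq_true, beq_iff_eq, Prod.mk.injEq]
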